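-- pv_equiv track=rewrite | github.com/ZhaoShuai2332/final_credit | scripts/dgk_p_compare.py | compute_c_shares
-- ===== SOURCE A (Python) =====
-- from typing import List, Tuple, Optional
--
-- def compute_c_shares(
--     a_shares: List[int],
--     b_shares: List[int],
--     x_bits:   List[int],
--     alpha_w:  List[int],
--     beta_w:   List[int],
--     modulus:  int
-- ) -> Tuple[List[int], List[int]]:
--     """
--     Compute shares of c_i = x_i - m_i + 1 + sum_{j=i+1}^{bit_length-1} w_j.
--     """
--     length = len(a_shares)
--     alpha_c, beta_c = [], []
--     # Precompute suffix sums to optimize to O(n)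
--     suffix_alpha = [0] * (length + 1)
--     suffix_beta  = [0] * (length + 1)
--     for i in range(length-1, -1, -1):
--         suffix_alpha[i] = (alpha_w[i] + suffix_alpha[i+1]) % modulus
--         suffix_beta[i]  = (beta_w[i]  + suffix_beta[i+1])  % modulus
--
--     for i in range(length):
--         # exclude w_i itself by using suffix at i+1
--         sum_a = suffix_alpha[i+1]
--         sum_b = suffix_beta[i+1]
--         xi   = x_bits[i]
--         alpha_c.append((xi - a_shares[i] + 1 + sum_a) % modulus)
--         beta_c.append((    - b_shares[i] +   sum_b) % modulus)
--     return alpha_c, beta_c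
-- ===== SOURCE B (Python) =====
-- def compute_c_shares(a_shares, b_shares, x_bits, alpha_w, beta_w, modulus):
--     n = len(a_shares)
--     alpha_rev, beta_rev = [], []
--     run_a = run_b = 0
--     for i in range(n - 1, -1, -1):
--         alpha_rev.append((x_bits[i] - a_shares[i] + 1 + run_a) % modulus)
--         beta_rev.append((-b_shares[i] + run_b) % modulus)
--         run_a = (run_a + alpha_w[i]) % modulus
--         run_b = (run_b + beta_w[i]) % modulus
--     return alpha_rev[::-1], beta_rev[::-1]
-- ===== Notes on version B (the rewrite author's own statement) =====
-- stated objective: simpler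
-- what changed: Replaces the two precomputed suffix-sum arrays and the second forward loop with a single backward pass carrying two scalar accumulators, reversing the built lists at the end.
import Mathlib
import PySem

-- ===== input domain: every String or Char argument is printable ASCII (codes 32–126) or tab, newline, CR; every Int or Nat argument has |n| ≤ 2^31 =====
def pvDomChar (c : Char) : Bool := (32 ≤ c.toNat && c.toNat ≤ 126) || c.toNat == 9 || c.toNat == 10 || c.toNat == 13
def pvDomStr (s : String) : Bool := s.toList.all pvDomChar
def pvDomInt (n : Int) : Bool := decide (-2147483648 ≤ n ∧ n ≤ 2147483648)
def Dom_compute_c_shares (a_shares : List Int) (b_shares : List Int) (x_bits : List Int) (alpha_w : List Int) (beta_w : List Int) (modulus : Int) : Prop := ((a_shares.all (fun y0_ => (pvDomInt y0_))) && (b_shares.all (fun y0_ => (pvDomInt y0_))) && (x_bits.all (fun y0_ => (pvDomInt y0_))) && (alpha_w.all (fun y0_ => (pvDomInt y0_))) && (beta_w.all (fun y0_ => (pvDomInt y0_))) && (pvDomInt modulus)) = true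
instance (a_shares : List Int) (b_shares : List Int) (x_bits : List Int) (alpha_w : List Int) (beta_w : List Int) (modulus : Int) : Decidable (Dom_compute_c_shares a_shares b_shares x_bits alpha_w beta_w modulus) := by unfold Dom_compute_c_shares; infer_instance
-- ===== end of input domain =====

-- B replaces A's two suffix-sum arrays plus forward loop with a single backward pass
-- carrying two scalar accumulators (objective: simpler; same O(n) cost).

-- ===== PORT A =====
-- Literal transliteration of A: suffix arrays filled by a backward index loop with
-- list assignment (pySetD) and indexing (pyGetD), then a forward loop appending results.
def compute_c_shares (a_shares : List Int) (b_shares : List Int) (x_bits : List Int) (alpha_w : List Int) (beta_w : List Int) (modulus : Int) : List Int × List Int :=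
  let length : Nat := a_shares.length
  let sab :=
    (PySem.List.pyRange ((length : Int) - 1) (-1) (-1)).foldl
      (fun (s : List Int × List Int) i =>
        (PySem.List.pySetD s.1 i (PySem.Int.mod (PySem.List.pyGetD alpha_w i 0 + PySem.List.pyGetD s.1 (i + 1) 0) modulus),
         PySem.List.pySetD s.2 i (PySem.Int.mod (PySem.List.pyGetD beta_w i 0 + PySem.List.pyGetD s.2 (i + 1) 0) modulus)))
      (List.replicate (length + 1) 0, List.replicate (length + 1) 0)
  (PySem.List.pyRange 0 (length : Int) 1).foldl
    (fun (acc : List Int × List Int) i =>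
      (acc.1 ++ [PySem.Int.mod (PySem.List.pyGetD x_bits i 0 - PySem.List.pyGetD a_shares i 0 + 1 + PySem.List.pyGetD sab.1 (i + 1) 0) modulus],
       acc.2 ++ [PySem.Int.mod (-(PySem.List.pyGetD b_shares i 0) + PySem.List.pyGetD sab.2 (i + 1) 0) modulus]))
    ([], [])

-- ===== PORT B =====
-- Literal transliteration of Source B: one backward loop with state
-- (alpha_rev, beta_rev, run_a, run_b), reversing the two lists at the end.
def compute_c_shares_alt (a_shares : List Int) (b_shares : List Int) (x_bits : List Int) (alpha_w : List Int) (beta_w : List Int) (modulus : Int) : List Int × List Int :=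
  let n : Nat := a_shares.length
  let st :=
    (PySem.List.pyRange ((n : Int) - 1) (-1) (-1)).foldl
      (fun (st : List Int × List Int × Int × Int) i =>
        (st.1 ++ [PySem.Int.mod (PySem.List.pyGetD x_bits i 0 - PySem.List.pyGetD a_shares i 0 + 1 + st.2.2.1) modulus],
         st.2.1 ++ [PySem.Int.mod (-(PySem.List.pyGetD b_shares i 0) + st.2.2.2) modulus],
         PySem.Int.mod (st.2.2.1 + PySem.List.pyGetD alpha_w i 0) modulus,
         PySem.Int.mod (st.2.2.2 + PySem.List.pyGetD beta_w i 0) modulus))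
      ([], [], 0, 0)
  (st.1.reverse, st.2.1.reverse)

-- ===== PRECONDITION & SPEC =====
-- Exactly the inputs on which Python A returns: with a nonempty a_shares it raises
-- ZeroDivisionError when modulus = 0 and IndexError when any companion list is shorter
-- than a_shares; with a_shares = [] it returns ([], []) unconditionally.
def Pre_compute_c_shares (a_shares : List Int) (b_shares : List Int) (x_bits : List Int) (alpha_w : List Int) (beta_w : List Int) (modulus : Int) : Prop :=
  a_shares = [] ∨
    (modulus ≠ 0 ∧ a_shares.length ≤ b_shares.length ∧ a_shares.length ≤ x_bits.length ∧
      a_shares.length ≤ alpha_w.length ∧ a_shares.length ≤ beta_w.length)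
instance (a_shares : List Int) (b_shares : List Int) (x_bits : List Int) (alpha_w : List Int) (beta_w : List Int) (modulus : Int) : Decidable (Pre_compute_c_shares a_shares b_shares x_bits alpha_w beta_w modulus) := by unfold Pre_compute_c_shares; infer_instance

def pvWitness_compute_c_shares : List Int × List Int × List Int × List Int × List Int × Int := ([1], [2], [1], [3], [4], 7)

def Spec_compute_c_shares (a_shares : List Int) (b_shares : List Int) (x_bits : List Int) (alpha_w : List Int) (beta_w : List Int) (modulus : Int) (out : List Int × List Int) : Prop := out = compute_c_shares_alt a_shares b_shares x_bits alpha_w beta_w modulus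
instance (a_shares : List Int) (b_shares : List Int) (x_bits : List Int) (alpha_w : List Int) (beta_w : List Int) (modulus : Int) (out : List Int × List Int) : Decidable (Spec_compute_c_shares a_shares b_shares x_bits alpha_w beta_w modulus out) := by unfold Spec_compute_c_shares; infer_instance

-- ===== CLAIM (what is proved, stated in full; the proofs are below) =====
def Claim_equal_compute_c_shares : Prop := ∀ (a_shares : List Int) (b_shares : List Int) (x_bits : List Int) (alpha_w : List Int) (beta_w : List Int) (modulus : Int), Dom_compute_c_shares a_shares b_shares x_bits alpha_w beta_w modulus → Pre_compute_c_shares a_shares b_shares x_bits alpha_w beta_w modulus → Spec_compute_c_shares a_shares b_shares x_bits alpha_w beta_w modulus (compute_c_shares a_shares b_shares x_bits alpha_w beta_w modulus)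

-- ===== LEMMAS AND PROOFS =====

/-- Suffix sum with a mod reduction at every step (the value both programs carry). -/
def sufS (m : Int) (w : List Int) : Int := w.foldr (fun a s => PySem.Int.mod (a + s) m) 0

/-- The contents of A's suffix array after it has been filled down to index `t`. -/
def mkSuf (m : Int) (w : List Int) (n t : Nat) : List Int :=
  (List.range (n + 1)).map (fun k => if t ≤ k then sufS m ((w.take n).drop k) else 0)

lemma sufS_drop (m : Int) (w : List Int) (n t : Nat) (ht : t < n) (hw : n ≤ w.length) :
    sufS m ((w.take n).drop t) = PySem.Int.mod (w.getD t 0 + sufS m ((w.take n).drop (t + 1))) m := by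
  have hlt : t < (w.take n).length := by simp [List.length_take]; omega
  rw [List.drop_eq_getElem_cons hlt]
  simp [sufS, List.getElem_take, List.getD_eq_getElem?_getD, List.getElem?_eq_getElem (by omega : t < w.length)]

lemma sufS_nil_drop (m : Int) (w : List Int) (n : Nat) :
    sufS m ((w.take n).drop n) = 0 := by
  rw [List.drop_eq_nil_of_le (by simp [List.length_take])]
  rfl

lemma mkSuf_top (m : Int) (w : List Int) (n : Nat) :
    mkSuf m w n n = List.replicate (n + 1) 0 := by
  apply List.ext_getElem
  · simp [mkSuf]
  · intro k h1 h2
    simp only [mkSuf, List.getElem_map, List.getElem_range, List.getElem_replicate]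
    split
    · next hk =>
      have : n ≤ k := hk
      rw [List.drop_eq_nil_of_le (by simp [List.length_take]; omega)]
      rfl
    · rfl

lemma mkSuf_getD (m : Int) (w : List Int) (n t k : Nat) (htk : t ≤ k) (hk : k ≤ n) :
    (mkSuf m w n t).getD k 0 = sufS m ((w.take n).drop k) := by
  have hk' : k < (List.range (n + 1)).length := by simp; omega
  simp [mkSuf, List.getD_eq_getElem?_getD, List.getElem?_map, List.getElem?_range (by omega : k < n + 1), htk]

lemma mkSuf_set (m : Int) (w : List Int) (n t : Nat) (ht : t < n) (hw : n ≤ w.length) :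
    (mkSuf m w n (t + 1)).set t (PySem.Int.mod (w.getD t 0 + (mkSuf m w n (t + 1)).getD (t + 1) 0) m)
      = mkSuf m w n t := by
  rw [mkSuf_getD m w n (t + 1) (t + 1) le_rfl (by omega), ← sufS_drop m w n t ht hw]
  apply List.ext_getElem
  · simp [mkSuf]
  · intro k h1 h2
    simp only [mkSuf, List.length_map, List.length_range] at h2 ⊢
    rw [List.getElem_set]
    simp only [List.getElem_map, List.getElem_range]
    by_cases hkt : t = k
    · simp [hkt]
    · simp only [if_neg hkt]
      by_cases hle : t ≤ k
      · rw [if_pos (by omega : t + 1 ≤ k), if_pos hle]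
      · rw [if_neg (by omega : ¬ (t + 1 ≤ k)), if_neg hle]

/-- A's backward fill loop: from the array filled down to `t`, it produces the fully
filled pair of suffix arrays. -/
lemma Aloop (m : Int) (wa wb : List Int) (n : Nat)
    (hwa : n ≤ wa.length) (hwb : n ≤ wb.length) :
    ∀ t, t ≤ n →
    (PySem.List.pyRange ((t : Int) - 1) (-1) (-1)).foldl
      (fun (s : List Int × List Int) i =>
        (PySem.List.pySetD s.1 i (PySem.Int.mod (PySem.List.pyGetD wa i 0 + PySem.List.pyGetD s.1 (i + 1) 0) m),
         PySem.List.pySetD s.2 i (PySem.Int.mod (PySem.List.pyGetD wb i 0 + PySem.List.pyGetD s.2 (i + 1) 0) m)))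
      (mkSuf m wa n t, mkSuf m wb n t)
    = (mkSuf m wa n 0, mkSuf m wb n 0) := by
  intro t
  induction t with
  | zero =>
    intro _
    rw [PySem.List.pyRange_neg_one_eq_nil (by norm_num)]
    rfl
  | succ t ih =>
    intro ht
    have hcast : ((t + 1 : Nat) : Int) - 1 = (t : Nat) := by push_cast; ring
    rw [hcast, PySem.List.pyRange_neg_one_cons (by omega : (-1 : Int) < (t : Nat))]
    simp only [List.foldl_cons]
    have hget1 : PySem.List.pyGetD (mkSuf m wa n (t + 1)) ((t : Int) + 1) 0 = (mkSuf m wa n (t + 1)).getD (t + 1) 0 := by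
      have : (t : Int) + 1 = ((t + 1 : Nat) : Int) := by push_cast; ring
      rw [this, PySem.List.pyGetD_natCast]
    have hget2 : PySem.List.pyGetD (mkSuf m wb n (t + 1)) ((t : Int) + 1) 0 = (mkSuf m wb n (t + 1)).getD (t + 1) 0 := by
      have : (t : Int) + 1 = ((t + 1 : Nat) : Int) := by push_cast; ring
      rw [this, PySem.List.pyGetD_natCast]
    simp only [hget1, hget2, PySem.List.pyGetD_natCast, PySem.List.pySetD_natCast]
    rw [mkSuf_set m wa n t (by omega) hwa, mkSuf_set m wb n t (by omega) hwb]
    exact ih (by omega)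

/-- B's backward loop invariant: the accumulators hold the reduced suffix sums and the
reversed output lists hold the results for indices `t-1 … 0`. -/
lemma Bloop (m : Int) (a b x wa wb : List Int) (n : Nat)
    (hwa : n ≤ wa.length) (hwb : n ≤ wb.length) :
    ∀ t, t ≤ n → ∀ (ra rb : List Int),
    (PySem.List.pyRange ((t : Int) - 1) (-1) (-1)).foldl
      (fun (st : List Int × List Int × Int × Int) i =>
        (st.1 ++ [PySem.Int.mod (PySem.List.pyGetD x i 0 - PySem.List.pyGetD a i 0 + 1 + st.2.2.1) m],
         st.2.1 ++ [PySem.Int.mod (-(PySem.List.pyGetD b i 0) + st.2.2.2) m],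
         PySem.Int.mod (st.2.2.1 + PySem.List.pyGetD wa i 0) m,
         PySem.Int.mod (st.2.2.2 + PySem.List.pyGetD wb i 0) m))
      (ra, rb, sufS m ((wa.take n).drop t), sufS m ((wb.take n).drop t))
    = (ra ++ ((List.range t).map (fun k =>
          PySem.Int.mod (x.getD k 0 - a.getD k 0 + 1 + sufS m ((wa.take n).drop (k + 1))) m)).reverse,
       rb ++ ((List.range t).map (fun k =>
          PySem.Int.mod (-(b.getD k 0) + sufS m ((wb.take n).drop (k + 1))) m)).reverse,
       sufS m (wa.take n), sufS m (wb.take n)) := by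
  intro t
  induction t with
  | zero =>
    intro _ ra rb
    rw [PySem.List.pyRange_neg_one_eq_nil (by norm_num)]
    simp
  | succ t ih =>
    intro ht ra rb
    have hcast : ((t + 1 : Nat) : Int) - 1 = (t : Nat) := by push_cast; ring
    rw [hcast, PySem.List.pyRange_neg_one_cons (by omega : (-1 : Int) < (t : Nat))]
    simp only [List.foldl_cons, PySem.List.pyGetD_natCast]
    have hrun_a : PySem.Int.mod (sufS m ((wa.take n).drop (t + 1)) + wa.getD t 0) m
        = sufS m ((wa.take n).drop t) := by
      rw [sufS_drop m wa n t (by omega) hwa, add_comm]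
    have hrun_b : PySem.Int.mod (sufS m ((wb.take n).drop (t + 1)) + wb.getD t 0) m
        = sufS m ((wb.take n).drop t) := by
      rw [sufS_drop m wb n t (by omega) hwb, add_comm]
    rw [hrun_a, hrun_b, ih (by omega)]
    simp [List.range_succ]

/-- Evaluate both ports to the common map form and compare. -/
theorem main_eq (a b x wa wb : List Int) (m : Int)
    (hb : a.length ≤ b.length) (hx : a.length ≤ x.length)
    (hwa : a.length ≤ wa.length) (hwb : a.length ≤ wb.length) :
    compute_c_shares a b x wa wb m = compute_c_shares_alt a b x wa wb m := by
  have hA := Aloop m wa wb a.length hwa hwb a.length le_rfl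
  rw [mkSuf_top, mkSuf_top] at hA
  have hB := Bloop m a b x wa wb a.length hwa hwb a.length le_rfl [] []
  rw [sufS_nil_drop, sufS_nil_drop] at hB
  simp only [compute_c_shares, compute_c_shares_alt]
  rw [hA, hB]
  -- A's second loop: a pair of append-folds is a pair of maps
  rw [PySem.List.foldl_prod_mk
      (fun (s : List Int) (i : Int) => s ++ [PySem.Int.mod (PySem.List.pyGetD x i 0 - PySem.List.pyGetD a i 0 + 1 + PySem.List.pyGetD (mkSuf m wa a.length 0) (i + 1) 0) m])
      (fun (s : List Int) (i : Int) => s ++ [PySem.Int.mod (-(PySem.List.pyGetD b i 0) + PySem.List.pyGetD (mkSuf m wb a.length 0) (i + 1) 0) m])]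
  rw [PySem.List.foldl_append_singleton_eq_map, PySem.List.foldl_append_singleton_eq_map]
  rw [PySem.List.pyRange_zero_nat a.length]
  simp only [List.nil_append, List.map_map, List.reverse_reverse]
  simp only [Prod.mk.injEq]
  constructor <;>
  · apply List.map_congr_left
    intro k hk
    have hk' : k < a.length := List.mem_range.mp hk
    have hc : ((k : Nat) : Int) + 1 = ((k + 1 : Nat) : Int) := by push_cast; ring
    simp only [Function.comp_apply, hc, PySem.List.pyGetD_natCast]
    rw [mkSuf_getD _ _ a.length 0 (k + 1) (by omega) (by omega)]

-- ===== VERDICT (by name: the statement is the Claim_ definition above) =====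
theorem compute_c_shares_spec : Claim_equal_compute_c_shares := by
  intro a b x wa wb m _ hpre
  unfold Spec_compute_c_shares
  rcases hpre with h0 | ⟨_, hb, hx, hwa, hwb⟩
  · subst h0
    exact main_eq [] b x wa wb m (by simp) (by simp) (by simp) (by simp)
  · exact main_eq a b x wa wb m hb hx hwa hwb
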